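-- pv_equiv track=rewrite | github.com/WillJRoper/advent-of-code | 2023/solutions/day3.py | get_part_nums
-- ===== SOURCE A (Python) =====
-- def get_part_nums(line):
--     """
--     Get the part number candidates removing symbols and storing the index.
--
--     Args:
--         line (string)
--             The line to parse.
--
--     Returns:
--         ndarray
--             A list of indices.
--         list
--             A list of the parsed part numbers.
--     """
--     part_nums = []
--     part_inds = []
--     pnum = None
--     for j, s in enumerate(line):
--         if s.isnumeric() and pnum is None:
--             pnum = s
--             ind = j
--         elif s.isnumeric():
--             pnum += s
--         elif pnum is not None:
--             part_nums.append(pnum)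
--             part_inds.append(ind)
--             pnum = None
--     if pnum is not None:
--         part_nums.append(pnum)
--         part_inds.append(ind)
--
--     return part_inds, part_nums
-- ===== SOURCE B (Python) =====
-- def get_part_nums(line):
--     n = len(line)
--     digit = [c.isnumeric() for c in line]
--     starts = [j for j in range(n) if digit[j] and (j == 0 or not digit[j - 1])]
--     ends = [j + 1 for j in range(n) if digit[j] and (j + 1 == n or not digit[j + 1])]
--     return starts, [line[s:e] for s, e in zip(starts, ends)]
-- ===== Notes on version B (the rewrite author's own statement) =====
-- stated objective: alternative
-- what changed: Replaces A's left-to-right accumulator state machine (with trailing flush) by staged passes: build a digit mask, detect run starts and run ends by comparing each position with its neighbour, then slice the line between the paired boundaries.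
import Mathlib
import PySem

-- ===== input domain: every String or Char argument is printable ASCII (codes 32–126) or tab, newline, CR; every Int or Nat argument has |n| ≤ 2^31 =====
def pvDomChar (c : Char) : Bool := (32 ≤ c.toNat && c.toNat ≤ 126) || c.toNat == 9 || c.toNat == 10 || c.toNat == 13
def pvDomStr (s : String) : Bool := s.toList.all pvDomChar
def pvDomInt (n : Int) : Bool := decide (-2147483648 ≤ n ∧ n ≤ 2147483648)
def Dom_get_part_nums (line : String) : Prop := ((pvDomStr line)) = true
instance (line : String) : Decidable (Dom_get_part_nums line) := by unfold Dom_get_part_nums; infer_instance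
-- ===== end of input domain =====

-- B replaces A's accumulator state machine by staged passes: digit mask, neighbour-based
-- run-start/run-end boundary detection, then slicing between paired boundaries; objective: alternative.

-- s.isnumeric() on a one-character string: on the printable-ASCII domain this is exactly isdigit
def pyIsNum (c : Char) : Bool := PySem.Chars.isdigit c

-- ===== PORT A =====
-- loop state: (part_inds, part_nums, pnum, ind)
def pvStateA : Type := List Int × List String × Option String × Int

def pvStepA (st : pvStateA) (j : Int) (c : Char) : pvStateA :=
  match st with
  | (inds, nums, pnum, ind) =>
    match pnum with
    | none => if pyIsNum c then (inds, nums, some (String.singleton c), j) else (inds, nums, none, ind)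
    | some p =>
      if pyIsNum c then (inds, nums, some (p ++ String.singleton c), ind)
      else (inds ++ [ind], nums ++ [p], none, ind)

def pvLoopA (j : Int) (st : pvStateA) : List Char → pvStateA
  | [] => st
  | c :: rest => pvLoopA (j + 1) (pvStepA st j c) rest

-- the trailing 'if pnum is not None' flush and the final return
def pvFlushA (st : pvStateA) : List Int × List String :=
  match st with
  | (inds, nums, some p, ind) => (inds ++ [ind], nums ++ [p])
  | (inds, nums, none, _) => (inds, nums)

def get_part_nums (line : String) : List Int × List String :=
  pvFlushA (pvLoopA 0 ([], [], none, 0) line.toList)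

-- ===== PORT B =====
-- [j for j in range(n) if digit[j] and (j == 0 or not digit[j - 1])]
-- (indices are kept as Nat internally and cast to Int in the result; the getD default is
-- never taken: the comprehension only indexes digit[j] with j produced by range(n))
def pvStartsB (mask : List Bool) : List Nat :=
  (List.range mask.length).filter (fun j => mask.getD j false && (j == 0 || !(mask.getD (j - 1) false)))

-- [j + 1 for j in range(n) if digit[j] and (j + 1 == n or not digit[j + 1])]
def pvEndsB (mask : List Bool) : List Nat :=
  ((List.range mask.length).filter (fun j => mask.getD j false && (j + 1 == mask.length || !(mask.getD (j + 1) false)))).map (· + 1)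

-- line[s:e]: exact as drop/take here since the paired boundaries satisfy 0 ≤ s ≤ e ≤ len(line)
def get_part_nums_alt (line : String) : List Int × List String :=
  ((pvStartsB (line.toList.map pyIsNum)).map Int.ofNat,
   ((pvStartsB (line.toList.map pyIsNum)).zip (pvEndsB (line.toList.map pyIsNum))).map
     (fun se => String.ofList ((line.toList.drop se.1).take (se.2 - se.1))))

-- ===== PRECONDITION & SPEC =====
def Spec_get_part_nums (line : String) (out : List Int × List String) : Prop := out = get_part_nums_alt line
instance (line : String) (out : List Int × List String) : Decidable (Spec_get_part_nums line out) := by unfold Spec_get_part_nums; infer_instance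

-- ===== CLAIM (what is proved, stated in full; the proofs are below) =====
def Claim_equal_get_part_nums : Prop := ∀ (line : String), Dom_get_part_nums line → Spec_get_part_nums line (get_part_nums line)

-- ===== LEMMAS AND PROOFS =====

-- proof-only intermediate: maximal digit runs with absolute start index
def pvRunsB (j : Int) : List Char → List Int × List String
  | [] => ([], [])
  | c :: rest =>
    if h : pyIsNum c then
      (j :: (pvRunsB (j + (List.takeWhile pyIsNum (c :: rest)).length) (List.dropWhile pyIsNum (c :: rest))).1,
       String.ofList (List.takeWhile pyIsNum (c :: rest))
         :: (pvRunsB (j + (List.takeWhile pyIsNum (c :: rest)).length) (List.dropWhile pyIsNum (c :: rest))).2)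
    else
      pvRunsB (j + 1) rest
termination_by l => l.length
decreasing_by
  all_goals first
    | (simp only [List.dropWhile_cons, h, if_true]
       have := List.length_dropWhile_le pyIsNum rest
       simp; omega)
    | simp

-- recursive characterisations of the boundary filters
def stR (prev : Bool) : List Bool → List Nat
  | [] => []
  | b :: m => (if b && !prev then [0] else []) ++ (stR b m).map (· + 1)
def enR : List Bool → List Nat
  | [] => []
  | b :: m => (if b && !(m.getD 0 false) then [0] else []) ++ (enR m).map (· + 1)

def pvStartsG (prev : Bool) (mask : List Bool) : List Nat :=
  (List.range mask.length).filter (fun j => mask.getD j false && (if j == 0 then !prev else !(mask.getD (j - 1) false)))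

theorem startsB_eq_G (mask : List Bool) : pvStartsB mask = pvStartsG false mask := by
  unfold pvStartsB pvStartsG
  congr 1
  funext j
  cases j <;> simp

theorem startsG_eq_stR (mask : List Bool) : ∀ prev, pvStartsG prev mask = stR prev mask := by
  induction mask with
  | nil => intro prev; rfl
  | cons b m ih =>
    intro prev
    unfold pvStartsG stR
    rw [List.length_cons, List.range_succ_eq_map, List.filter_cons, List.filter_map]
    have hp : ((fun j => (b :: m).getD j false && (if j == 0 then !prev else !((b :: m).getD (j - 1) false))) ∘ Nat.succ)
        = fun j => m.getD j false && (if j == 0 then !b else !(m.getD (j - 1) false)) := by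
      funext j
      cases j with
      | zero => simp
      | succ i => simp
    rw [hp, ← pvStartsG, ih b]
    cases b <;> cases prev <;> simp

theorem endsF_eq_enR (mask : List Bool) :
    (List.range mask.length).filter (fun j => mask.getD j false && (j + 1 == mask.length || !(mask.getD (j + 1) false))) = enR mask := by
  induction mask with
  | nil => rfl
  | cons b m ih =>
    rw [enR, List.length_cons, List.range_succ_eq_map, List.filter_cons, List.filter_map]
    have hp : ((fun j => (b :: m).getD j false && (j + 1 == m.length + 1 || !((b :: m).getD (j + 1) false))) ∘ Nat.succ)
        = fun j => m.getD j false && (j + 1 == m.length || !(m.getD (j + 1) false)) := by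
      funext j
      simp [Nat.succ_eq_add_one]
    rw [hp, ih]
    have h0 : ((b :: m).getD 0 false && (0 + 1 == m.length + 1 || !((b :: m).getD (0 + 1) false)))
        = (b && !(m.getD 0 false)) := by
      cases m <;> simp
    rw [h0]
    cases (b && !(m.getD 0 false)) <;> simp

theorem stR_run (k : Nat) (m : List Bool) (hm : m.getD 0 false = false) :
    stR true (List.replicate k true ++ m) = (stR false m).map (· + k) := by
  induction k with
  | zero =>
    simp only [List.replicate_zero, List.nil_append]
    cases m with
    | nil => rfl
    | cons b m' =>
      simp only [List.getD_cons_zero] at hm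
      subst hm
      simp [stR]
  | succ k ih =>
    rw [List.replicate_succ, List.cons_append, stR, ih]
    simp [List.map_map]

theorem enR_run (k : Nat) (hk : 1 ≤ k) (m : List Bool) (hm : m.getD 0 false = false) :
    enR (List.replicate k true ++ m) = (k - 1) :: (enR m).map (· + k) := by
  induction k with
  | zero => omega
  | succ k ih =>
    rw [List.replicate_succ, List.cons_append, enR]
    cases Nat.eq_zero_or_pos k with
    | inl h =>
      subst h
      simp only [List.getD_eq_getElem?_getD] at hm
      simp [hm]
    | inr h =>
      have hh : (List.replicate k true ++ m).getD 0 false = true := by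
        cases k with
        | zero => omega
        | succ k' => simp [List.replicate_succ]
      rw [ih h, hh]
      simp [List.map_map]
      have : k - 1 + 1 = k := by omega
      rw [this]

theorem mask_drop_head (l : List Char) :
    ((l.dropWhile pyIsNum).map pyIsNum).getD 0 false = false := by
  induction l with
  | nil => rfl
  | cons c t ih =>
    rw [List.dropWhile_cons]
    by_cases h : pyIsNum c
    · rw [if_pos h]; exact ih
    · rw [if_neg h]; simp [h]

theorem mask_take_replicate (l : List Char) :
    (l.takeWhile pyIsNum).map pyIsNum = List.replicate (l.takeWhile pyIsNum).length true := by
  induction l with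
  | nil => rfl
  | cons c t ih =>
    rw [List.takeWhile_cons]
    by_cases h : pyIsNum c
    · simp [h, ih, List.replicate_succ]
    · simp [h]

theorem stR_false_run (k : Nat) (hk : 1 ≤ k) (m : List Bool) (hm : m.getD 0 false = false) :
    stR false (List.replicate k true ++ m) = 0 :: (stR false m).map (· + k) := by
  obtain ⟨k', rfl⟩ : ∃ k', k = k' + 1 := ⟨k - 1, by omega⟩
  rw [List.replicate_succ, List.cons_append, stR, stR_run k' m hm]
  simp [List.map_map]

theorem staged_runs (n : Nat) : ∀ (chars : List Char), chars.length = n → ∀ (j : Int),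
    pvRunsB j chars =
      ((stR false (chars.map pyIsNum)).map (fun (s : Nat) => j + (s : Int)),
       ((stR false (chars.map pyIsNum)).zip ((enR (chars.map pyIsNum)).map (· + 1))).map
         (fun se => String.ofList ((chars.drop se.1).take (se.2 - se.1)))) := by
  induction n using Nat.strong_induction_on with
  | _ n IH =>
    intro chars hlen j
    match chars with
    | [] => simp [pvRunsB, stR, enR]
    | c :: rest =>
      by_cases h : pyIsNum c
      · -- digit case: peel the whole run
        rw [pvRunsB, dif_pos h]
        set run := List.takeWhile pyIsNum (c :: rest) with hrun
        set rest2 := List.dropWhile pyIsNum (c :: rest) with hrest2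
        have hk1 : 1 ≤ run.length := by
          rw [hrun, List.takeWhile_cons, if_pos h]; simp
        have hlen2 : rest2.length < n := by
          rw [hrest2, List.dropWhile_cons, if_pos h]
          have := List.length_dropWhile_le pyIsNum rest
          simp at hlen ⊢; omega
        have hmask : (c :: rest).map pyIsNum = List.replicate run.length true ++ rest2.map pyIsNum := by
          conv_lhs => rw [← List.takeWhile_append_dropWhile (p := pyIsNum) (l := c :: rest)]
          rw [List.map_append, ← hrun, ← hrest2, mask_take_replicate (c :: rest), hrun]
        have hm0 : (rest2.map pyIsNum).getD 0 false = false := by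
          rw [hrest2]; exact mask_drop_head (c :: rest)
        have ihr := IH rest2.length hlen2 rest2 rfl (j + run.length)
        rw [ihr]
        have hstart : (c :: rest).map pyIsNum
            = List.replicate run.length true ++ rest2.map pyIsNum := hmask
        rw [hstart, stR_false_run run.length hk1 _ hm0, enR_run run.length hk1 _ hm0]
        simp only [List.map_cons, List.zip_cons_cons, List.map_map, Prod.mk.injEq]
        have hch : (c :: rest) = run ++ rest2 := (List.takeWhile_append_dropWhile).symm
        refine ⟨?_, ?_⟩
        · refine List.cons_eq_cons.mpr ⟨by simp, ?_⟩
          refine List.map_congr_left fun s _ => ?_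
          simp
          ring
        · refine List.cons_eq_cons.mpr ⟨?_, ?_⟩
          · rw [show run.length - 1 + 1 - 0 = run.length by omega, List.drop_zero, hch,
              List.take_left]
          · rw [List.zip_map_right, List.map_map, List.zip_map, List.map_map]
            refine List.map_congr_left fun se _ => ?_
            simp only [Function.comp, Prod.map, id_eq]
            rw [hch, show se.1 + run.length = run.length + se.1 by omega,
              List.drop_length_add_append,
              show se.2 + run.length + 1 - (run.length + se.1) = se.2 + 1 - se.1 by omega]
      · have hb : pyIsNum c = false := by simpa using h
        rw [pvRunsB, dif_neg h]
        have hlen2 : rest.length < n := by simp at hlen; omega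
        rw [IH rest.length hlen2 rest rfl (j + 1)]
        rw [show (c :: rest).map pyIsNum = false :: rest.map pyIsNum by simp [hb]]
        rw [stR, enR]
        simp only [Bool.false_and, Bool.false_eq_true, if_false, List.nil_append,
          List.map_map, Prod.mk.injEq]
        refine ⟨?_, ?_⟩
        · refine List.map_congr_left fun s _ => ?_
          simp
          ring
        · rw [List.zip_map_right, List.map_map, List.zip_map, List.map_map]
          refine List.map_congr_left fun se _ => ?_
          simp only [Function.comp, Prod.map]
          simp only [id_eq]
          rw [List.drop_succ_cons,
            show se.2 + 1 + 1 - (se.1 + 1) = se.2 + 1 - se.1 by omega]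

theorem pv_cons_str (c : Char) (l : List Char) :
    String.singleton c ++ String.ofList l = String.ofList (c :: l) := by
  rw [String.singleton_eq_ofList, ← String.ofList_append]; rfl

-- joint loop invariant: A's loop+flush from a 'none' state computes the runs; from a
-- 'some p' state it first finishes the current run
theorem pv_main (n : Nat) : ∀ (chars : List Char), chars.length = n →
    (∀ (j : Int) (inds : List Int) (nums : List String) (ind : Int),
       pvFlushA (pvLoopA j (inds, nums, none, ind) chars)
         = (inds ++ (pvRunsB j chars).1, nums ++ (pvRunsB j chars).2))
    ∧ (∀ (j : Int) (inds : List Int) (nums : List String) (p : String) (ind : Int),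
       pvFlushA (pvLoopA j (inds, nums, some p, ind) chars)
         = (inds ++ ind :: (pvRunsB (j + (chars.takeWhile pyIsNum).length) (chars.dropWhile pyIsNum)).1,
            nums ++ (p ++ String.ofList (chars.takeWhile pyIsNum))
               :: (pvRunsB (j + (chars.takeWhile pyIsNum).length) (chars.dropWhile pyIsNum)).2)) := by
  induction n using Nat.strong_induction_on with
  | _ n IH =>
    intro chars hlen
    match chars with
    | [] =>
      constructor
      · intro j inds nums ind; simp [pvLoopA, pvFlushA, pvRunsB]
      · intro j inds nums p ind
        simp [pvLoopA, pvFlushA, pvRunsB, String.ofList_nil, String.append_empty]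
    | c :: rest =>
      have hr : rest.length < n := by simp at hlen; omega
      obtain ⟨ih1, ih2⟩ := IH rest.length hr rest rfl
      have harith : ∀ j : Int, (j + 1) + ((rest.takeWhile pyIsNum).length : Int)
          = j + (((c :: rest.takeWhile pyIsNum)).length : Int) := by
        intro j; simp; ring
      constructor
      · intro j inds nums ind
        by_cases h : pyIsNum c
        · rw [pvLoopA]
          simp only [pvStepA, h, if_true]
          rw [ih2, pvRunsB, dif_pos h]
          simp only [List.takeWhile_cons, List.dropWhile_cons, h, if_pos]
          rw [harith, pv_cons_str]
        · rw [pvLoopA]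
          simp only [pvStepA, h, Bool.false_eq_true, if_false]
          rw [ih1, pvRunsB, dif_neg h]
      · intro j inds nums p ind
        by_cases h : pyIsNum c
        · rw [pvLoopA]
          simp only [pvStepA, h, if_true]
          rw [ih2]
          simp only [List.takeWhile_cons, List.dropWhile_cons, h, if_pos]
          rw [harith, String.append_assoc, pv_cons_str]
        · rw [pvLoopA]
          simp only [pvStepA, h, Bool.false_eq_true, if_false]
          rw [ih1]
          simp only [List.takeWhile_cons, List.dropWhile_cons, h, Bool.false_eq_true, if_false]
          rw [pvRunsB, dif_neg h]
          simp [String.ofList_nil, String.append_empty, List.append_assoc]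

-- ===== VERDICT (by name: the statement is the Claim_ definition above) =====
theorem get_part_nums_spec : Claim_equal_get_part_nums := by
  intro line _
  unfold Spec_get_part_nums get_part_nums get_part_nums_alt pvEndsB
  have hA := (pv_main line.toList.length line.toList rfl).1 0 [] [] 0
  have hB := staged_runs line.toList.length line.toList rfl 0
  simp only [List.nil_append] at hA
  rw [hA, hB, startsB_eq_G, startsG_eq_stR, endsF_eq_enR]
  simp
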